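/- GENERATED by mk_final_copies.py from the proof of the farm's unit `vorbis_decode_packet_rest.2a` (farm:vorbis_decode_packet_rest.2a.1: Proof.lean) as the
   re-elaboration sweep compiled it — do not edit. -/
import Asan.CheckWalk
import Vorbis.Spec.PacketRestFrame
import Vorbis.Spec.Reader
import Vorbis.Spec.Units.vorbis_decode_packet_rest_2a
import Vorbis.Spec.Worked.vorbis_decode_packet_rest_2a_Lemmas

/-
  UNIT vorbis_decode_packet_rest.2a — segment .2a of `vorbis_decode_packet_rest` (0x1112d4–0x11138e and the return of
  `get_bits(f, 1)` at 0x111393; stb_vorbis_fixed.c 3225–3233): the head of the channel loop.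

      0x1112d4 … 0x1112e8   `i < f->channels` (one check site); `i ≥ C` → `At8` (0x111457)         Lemmas.lean `seg2a_head`
      0x1112ee … 0x111393   `s = map->chan[i].mux`, `zero_channel[i] = 0`, `floor = map->submap_floor[s]`, the type-0 test
                            (`At16`, 0x110c44), `g = &f->floor_config[floor]`, `get_bits(f, 1)` → `At2b`   Lemmas.lean `seg2a_body`

  The two stretches meet at 0x1112ee with the assertion `seg2a_AtB` (STABLE ∧ `r14 = i < C` ∧ `r13 = map`).
-/

open X86 X86.User Asan Vorbis Vorbis.Spec Vorbis.Spec.vorbis_decode_packet_rest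

/-- Segment .2a of `vorbis_decode_packet_rest` (0x1112d4–0x11138e): from `At2` (the head of the channel loop, channel `i`) to
`At8` (`i ≥ C`), `At16` (floor type 0: dead) or `At2b` (the return of `get_bits(f, 1)`, 0x111393). -/
theorem Vorbis.Spec.Worked.vorbis_decode_packet_rest_2a_ok : Vorbis.Spec.vorbis_decode_packet_rest_2a.Statement := by
  unfold Vorbis.Spec.vorbis_decode_packet_rest_2a.Statement
  intro Lay hLay μ hμ u₀ hcode h_load4 h_load8 h_load1 h_store4 h_load2 h_get_bits
  intro others frames len Ar stored room mode ysz e ret i v hat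
  -- get_bits is called inside the function: its frames are the function's own in front of the callers'
  have hgb := h_get_bits others (framesIn frames e) (RunBlk Ar len) len
  -- 0x1112d4 … 0x1112e8 (line 3225), then 0x1112ee … 0x111393 (lines 3226–3233)
  refine Vorbis.Spec.vorbis_decode_packet_rest_2a.seg2a_head hLay hμ hcode h_load4 hat _ ?_ ?_
  · intro w h8
    exact Or.inl h8
  · intro s hs
    exact Vorbis.Spec.vorbis_decode_packet_rest_2a.seg2a_body hLay hμ hcode h_load8 h_load1 h_store4 h_load2 hgb hs
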